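-- pv_equiv track=rewrite | github.com/ReiHakiri/Learning-computation | Proofs/Math/FOL/parsing.py | arguments
-- ===== SOURCE A (Python) =====
-- def arguments(s: tuple) -> tuple:
--     result = []
--
--     arg = []
--     n_bracs = 0
--
--     for c, i in s:
--         arg.append((c, i))
--
--         if c == '(':
--             n_bracs += 1
--
--         elif c == ')':
--             n_bracs -= 1
--
--         if n_bracs == 0:
--             result.append(tuple(arg))
--
--             arg = []
--
--     if n_bracs != 0:
--         raise Exception()
--
--     return tuple(result)
-- ===== SOURCE B (Python) =====
-- def arguments(s: tuple) -> tuple: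
--     # Phase 1: scan once, recording the positions where the running
--     # bracket balance returns to zero (group boundaries).
--     bal = 0
--     cuts = [0]
--     for idx, (c, i) in enumerate(s):
--         bal += (c == '(') - (c == ')')
--         if bal == 0:
--             cuts.append(idx + 1)
--     if bal != 0:
--         raise Exception()
--     # Phase 2: slice the input between consecutive boundaries.
--     return tuple(tuple(s[a:b]) for a, b in zip(cuts, cuts[1:]))
-- ===== Notes on version B (the rewrite author's own statement) =====
-- stated objective: alternative
-- what changed: B replaces A's incremental group accumulation with two phases: one scan records the indices where the running bracket balance is zero, then the input is sliced between consecutive boundary indices.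
import Mathlib
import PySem

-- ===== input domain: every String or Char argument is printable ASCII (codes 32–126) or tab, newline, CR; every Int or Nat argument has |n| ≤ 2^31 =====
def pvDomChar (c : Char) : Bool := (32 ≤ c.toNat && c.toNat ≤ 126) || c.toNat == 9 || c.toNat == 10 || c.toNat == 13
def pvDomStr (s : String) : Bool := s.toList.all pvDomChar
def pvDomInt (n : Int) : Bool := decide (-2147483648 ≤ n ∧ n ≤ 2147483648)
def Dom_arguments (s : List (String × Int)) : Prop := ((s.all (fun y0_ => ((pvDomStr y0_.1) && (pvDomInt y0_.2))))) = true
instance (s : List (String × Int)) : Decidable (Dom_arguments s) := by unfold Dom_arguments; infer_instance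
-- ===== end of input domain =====

-- B records the zero-balance boundary indices in one pass and then slices the
-- input between consecutive boundaries, instead of A's incremental accumulation.

-- ===== PORT A =====
def arguments (s : List (String × Int)) : List (List (String × Int)) :=
  let st := s.foldl
    (fun (acc : List (List (String × Int)) × List (String × Int) × Int) ci =>
      let arg := acc.2.1 ++ [ci]
      let n := if ci.1 = "(" then acc.2.2 + 1 else if ci.1 = ")" then acc.2.2 - 1 else acc.2.2
      if n = 0 then (acc.1 ++ [arg], ([] : List (String × Int)), n)
      else (acc.1, arg, n))
    ([], [], 0)
  st.1

-- ===== PORT B =====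
def arguments_alt (s : List (String × Int)) : List (List (String × Int)) :=
  let st := (PySem.List.enumerate s).foldl
    (fun (acc : Int × List Int) (p : Int × (String × Int)) =>
      let bal := acc.1 + ((if p.2.1 = "(" then (1:Int) else 0) - (if p.2.1 = ")" then (1:Int) else 0))
      if bal = 0 then (bal, acc.2 ++ [p.1 + 1]) else (bal, acc.2))
    (0, [0])
  (st.2.zip st.2.tail).map (fun ab => PySem.List.slice s (some ab.1) (some ab.2))

-- ===== PRECONDITION & SPEC =====
-- Pre_: the Python A raises a bare Exception when the brackets are unbalanced
-- (final running balance nonzero), i.e. unless '(' and ')' tokens are equinumerous.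
def Pre_arguments (s : List (String × Int)) : Prop :=
  s.countP (fun ci => ci.1 = "(") = s.countP (fun ci => ci.1 = ")")
instance (s : List (String × Int)) : Decidable (Pre_arguments s) := by unfold Pre_arguments; infer_instance
def pvWitness_arguments : (List (String × Int)) := [("(", 0), ("x", 3), (")", 1)]

def Spec_arguments (s : List (String × Int)) (out : List (List (String × Int))) : Prop := out = arguments_alt s
instance (s : List (String × Int)) (out : List (List (String × Int))) : Decidable (Spec_arguments s out) := by unfold Spec_arguments; infer_instance

-- ===== CLAIM (what is proved, stated in full; the proofs are below) =====
def Claim_equal_arguments : Prop := ∀ (s : List (String × Int)), Dom_arguments s → Pre_arguments s → Spec_arguments s (arguments s)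

-- ===== LEMMAS AND PROOFS =====

-- canonical balance step (A's if-chain)
def pvStep (b : Int) (x : String × Int) : Int :=
  if x.1 = "(" then b + 1 else if x.1 = ")" then b - 1 else b

-- A's groups, characterised recursively
def pvGroups (t : List (String × Int)) (arg : List (String × Int)) (b : Int) :
    List (List (String × Int)) :=
  match t with
  | [] => []
  | x :: xs =>
    let b' := pvStep b x
    if b' = 0 then (arg ++ [x]) :: pvGroups xs [] b'
    else pvGroups xs (arg ++ [x]) b'

def pvRest (t : List (String × Int)) (arg : List (String × Int)) (b : Int) :
    List (String × Int) :=
  match t with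
  | [] => arg
  | x :: xs =>
    let b' := pvStep b x
    if b' = 0 then pvRest xs [] b' else pvRest xs (arg ++ [x]) b'

def pvBal (t : List (String × Int)) (b : Int) : Int := t.foldl pvStep b

-- B's cut indices, characterised recursively
def pvCuts (t : List (String × Int)) (k : Int) (b : Int) : List Int :=
  match t with
  | [] => []
  | x :: xs =>
    let b' := pvStep b x
    (if b' = 0 then [k + 1] else []) ++ pvCuts xs (k + 1) b'

def pvSlices (full : List (String × Int)) (cs : List Int) : List (List (String × Int)) :=
  (cs.zip cs.tail).map (fun ab => PySem.List.slice full (some ab.1) (some ab.2))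

theorem pvStep_alt (b : Int) (x : String × Int) :
    b + ((if x.1 = "(" then (1:Int) else 0) - (if x.1 = ")" then (1:Int) else 0)) = pvStep b x := by
  unfold pvStep
  rcases x with ⟨c, i⟩
  by_cases h1 : c = "("
  · simp [h1]
  · by_cases h2 : c = ")"
    · simp [h1, h2]; ring
    · simp [h1, h2]

theorem pvSlices_cons (full : List (String × Int)) (a b : Int) (rest : List Int) :
    pvSlices full (a :: b :: rest) = PySem.List.slice full (some a) (some b) :: pvSlices full (b :: rest) := by
  simp [pvSlices]

-- A's fold, characterised
theorem foldA_eq (t : List (String × Int)) (res : List (List (String × Int)))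
    (arg : List (String × Int)) (b : Int) :
    t.foldl
      (fun (acc : List (List (String × Int)) × List (String × Int) × Int) ci =>
        let arg := acc.2.1 ++ [ci]
        let n := if ci.1 = "(" then acc.2.2 + 1 else if ci.1 = ")" then acc.2.2 - 1 else acc.2.2
        if n = 0 then (acc.1 ++ [arg], ([] : List (String × Int)), n)
        else (acc.1, arg, n)) (res, arg, b)
    = (res ++ pvGroups t arg b, pvRest t arg b, pvBal t b) := by
  induction t generalizing res arg b with
  | nil => simp [pvGroups, pvRest, pvBal]
  | cons x xs ih =>
    simp only [pvGroups, pvRest, pvBal, List.foldl]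
    by_cases h : pvStep b x = 0
    · simp only [pvStep] at h
      simp [h, ih, pvStep, pvBal]
    · simp only [pvStep] at h
      simp [h, ih, pvStep, pvBal]

-- B's fold, characterised
theorem foldB_eq (t : List (String × Int)) (k : Int) (b : Int) (cs : List Int) :
    (PySem.List.enumerate t k).foldl
      (fun (acc : Int × List Int) (p : Int × (String × Int)) =>
        let bal := acc.1 + ((if p.2.1 = "(" then (1:Int) else 0) - (if p.2.1 = ")" then (1:Int) else 0))
        if bal = 0 then (bal, acc.2 ++ [p.1 + 1]) else (bal, acc.2)) (b, cs)
    = (pvBal t b, cs ++ pvCuts t k b) := by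
  induction t generalizing k b cs with
  | nil => simp [PySem.List.enumerate_nil, pvBal, pvCuts]
  | cons x xs ih =>
    rw [PySem.List.enumerate_cons]
    simp only [pvBal, pvCuts, List.foldl]
    rw [pvStep_alt]
    by_cases h : pvStep b x = 0
    · simp [h, ih, pvBal]
    · simp [h, ih, pvBal]

-- the bridge: A's groups are B's slices between consecutive cut indices
theorem groups_eq_slices (t : List (String × Int)) (j k : Nat) (full : List (String × Int))
    (b : Int) (hjk : j ≤ k) (ht : full.drop k = t) :
    pvGroups t ((full.take k).drop j) b
      = pvSlices full ((j : Int) :: pvCuts t (k : Int) b) := by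
  induction t generalizing j k b with
  | nil => simp [pvGroups, pvCuts, pvSlices]
  | cons x xs ih =>
    have hk : k < full.length := by
      by_contra h
      simp [List.drop_eq_nil_of_le (le_of_not_gt h)] at ht
    have hx : full[k]'hk = x := by
      have h0 : (full.drop k)[0]'(by rw [ht]; simp) = x := by simp [ht]
      simpa using h0
    have hdrop : full.drop (k + 1) = xs := by
      have h1 : (full.drop k).drop 1 = xs := by rw [ht]; simp
      simpa [List.drop_drop] using h1
    have htake : full.take (k+1) = full.take k ++ [x] := by
      rw [List.take_add_one]; simp [List.getElem?_eq_getElem hk, hx]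
    have harg : (full.take k).drop j ++ [x] = (full.take (k+1)).drop j := by
      rw [htake, List.drop_append_of_le_length]
      simp [List.length_take, hk.le, hjk]
    have hcast : ((k:Int) + 1) = ((k+1:Nat):Int) := by push_cast; ring
    have hslice : PySem.List.slice full (some (j:Int)) (some ((k+1:Nat):Int))
        = (full.take (k+1)).drop j := by
      rw [PySem.List.slice_natCast, List.drop_take]
    by_cases h : pvStep b x = 0
    · rw [show pvGroups (x::xs) ((full.take k).drop j) b
          = ((full.take k).drop j ++ [x]) :: pvGroups xs [] (pvStep b x) from by
        simp [pvGroups, h]]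
      rw [show pvCuts (x::xs) (k:Int) b = ((k:Int)+1) :: pvCuts xs ((k:Int)+1) (pvStep b x) from by
        simp [pvCuts, h]]
      rw [pvSlices_cons, hcast, harg, hslice]
      congr 1
      have ihe := ih (k+1) (k+1) (pvStep b x) (le_refl _) hdrop
      have hnil : ((full.take (k+1)).drop (k+1)) = [] := by
        simp [List.drop_eq_nil_of_le, List.length_take]
      rwa [hnil] at ihe
    · rw [show pvGroups (x::xs) ((full.take k).drop j) b
          = pvGroups xs ((full.take k).drop j ++ [x]) (pvStep b x) from by
        simp [pvGroups, h]]
      rw [show pvCuts (x::xs) (k:Int) b = pvCuts xs ((k:Int)+1) (pvStep b x) from by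
        simp [pvCuts, h]]
      rw [harg, hcast]
      exact ih j (k+1) (pvStep b x) (by omega) hdrop

-- ===== VERDICT (by name: the statement is the Claim_ definition above) =====
theorem arguments_spec : Claim_equal_arguments := by
  intro s _ _
  unfold Spec_arguments arguments arguments_alt
  rw [foldA_eq, foldB_eq]
  have h := groups_eq_slices s 0 0 s 0 (le_refl _) (by simp)
  simpa [pvSlices] using h
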